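-- pv_equiv track=rewrite | github.com/Monyancha/Shelfy | ShelfyPy/algorithm.py | orderBottles
-- ===== SOURCE A (Python) =====
-- def orderBottles(dataset):
--     sorted_by_x = sorted(dataset, key=lambda tup: tup[1])
--     top_row = []
--     bottom_row = []
--     for x in sorted_by_x:
--         if x[2] > 1000:
--             top_row.append(x)
--         else:
--             bottom_row.append(x)
--
--     return top_row, bottom_row
-- ===== SOURCE B (Python) =====
-- def orderBottles(dataset):
--     key = lambda tup: tup[1]
--     top_row = [t for t in dataset if t[2] > 1000]
--     bottom_row = [t for t in dataset if t[2] <= 1000]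
--     return sorted(top_row, key=key), sorted(bottom_row, key=key)
-- ===== Notes on version B (the rewrite author's own statement) =====
-- stated objective: simpler
-- what changed: B partitions the raw dataset by the x[2] > 1000 test first and then stably sorts each row by tup[1], instead of A's global sort followed by an append loop; stability makes the results identical.
import Mathlib
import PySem

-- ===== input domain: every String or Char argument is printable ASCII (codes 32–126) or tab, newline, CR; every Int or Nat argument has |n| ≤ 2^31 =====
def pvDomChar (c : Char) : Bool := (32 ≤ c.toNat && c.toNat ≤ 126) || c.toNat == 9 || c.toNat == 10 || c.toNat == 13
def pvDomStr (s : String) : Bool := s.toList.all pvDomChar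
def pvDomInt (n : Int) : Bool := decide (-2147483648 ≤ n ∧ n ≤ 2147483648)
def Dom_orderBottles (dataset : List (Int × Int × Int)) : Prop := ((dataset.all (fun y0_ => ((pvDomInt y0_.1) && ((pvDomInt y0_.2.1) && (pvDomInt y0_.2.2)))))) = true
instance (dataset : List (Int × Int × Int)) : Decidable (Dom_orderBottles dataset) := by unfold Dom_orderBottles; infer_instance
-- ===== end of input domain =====

-- B partitions the dataset by the x[2] > 1000 test first and then stably sorts each row by tup[1]
-- (partition-then-sort instead of A's sort-then-partition); objective: simpler, same cost.


-- ===== PORT A =====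
def orderBottles (dataset : List (Int × Int × Int)) : (List (Int × Int × Int)) × (List (Int × Int × Int)) :=
  let sorted_by_x := PySem.List.sorted dataset (fun tup => tup.2.1)
  let rows := sorted_by_x.foldl
    (fun (acc : List (Int × Int × Int) × List (Int × Int × Int)) x =>
      if x.2.2 > 1000 then (acc.1 ++ [x], acc.2) else (acc.1, acc.2 ++ [x]))
    ([], [])
  (rows.1, rows.2)

-- ===== PORT B =====
def orderBottles_alt (dataset : List (Int × Int × Int)) : (List (Int × Int × Int)) × (List (Int × Int × Int)) :=
  let top_row := dataset.filter (fun t => t.2.2 > 1000)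
  let bottom_row := dataset.filter (fun t => t.2.2 ≤ 1000)
  (PySem.List.sorted top_row (fun tup => tup.2.1),
   PySem.List.sorted bottom_row (fun tup => tup.2.1))

-- ===== PRECONDITION & SPEC =====
def Spec_orderBottles (dataset : List (Int × Int × Int)) (out : (List (Int × Int × Int)) × (List (Int × Int × Int))) : Prop := out = orderBottles_alt dataset
instance (dataset : List (Int × Int × Int)) (out : (List (Int × Int × Int)) × (List (Int × Int × Int))) : Decidable (Spec_orderBottles dataset out) := by unfold Spec_orderBottles; infer_instance

-- ===== CLAIM (what is proved, stated in full; the proofs are below) =====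
def Claim_equal_orderBottles : Prop := ∀ (dataset : List (Int × Int × Int)), Dom_orderBottles dataset → Spec_orderBottles dataset (orderBottles dataset)

-- ===== LEMMAS AND PROOFS =====

/-- `insertBy` puts `x` at the front when `x` goes before every element. -/
theorem insertBy_front {α : Type} (b : α → α → Bool) (x : α) (l : List α)
    (h : ∀ w ∈ l, b x w = true) : PySem.List.insertBy b x l = x :: l := by
  cases l with
  | nil => rfl
  | cons y t => simp [PySem.List.insertBy, h y (by simp)]

/-- Filtering commutes with a single stable insertion into a key-sorted list. -/
theorem filter_insertBy {α : Type} (key : α → Int) (p : α → Bool) (x : α) (ys : List α)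
    (hs : ys.Pairwise (fun a b => key a ≤ key b)) :
    (PySem.List.insertBy (fun a b => decide (key a < key b)) x ys).filter p =
      if p x then PySem.List.insertBy (fun a b => decide (key a < key b)) x (ys.filter p)
      else ys.filter p := by
  induction ys with
  | nil =>
    cases hpx : p x <;> simp [PySem.List.insertBy, List.filter, hpx]
  | cons y t ih =>
    rcases List.pairwise_cons.mp hs with ⟨hy, ht⟩
    by_cases hxy : key x < key y
    · -- x is inserted before y
      have hall : ∀ w ∈ y :: t, (fun a b => decide (key a < key b)) x w = true := by
        intro w hw
        rcases List.mem_cons.mp hw with rfl | hw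
        · simpa using hxy
        · exact decide_eq_true (lt_of_lt_of_le hxy (hy w hw))
      rw [show PySem.List.insertBy (fun a b => decide (key a < key b)) x (y :: t) = x :: y :: t
            from insertBy_front _ _ _ hall]
      by_cases hpx : p x
      · have hall' : ∀ w ∈ (y :: t).filter p, (fun a b => decide (key a < key b)) x w = true :=
          fun w hw => hall w (List.mem_of_mem_filter hw)
        rw [insertBy_front _ _ _ hall']
        simp [List.filter, hpx]
      · simp [List.filter, hpx]
    · -- x goes past y
      have hstep : PySem.List.insertBy (fun a b => decide (key a < key b)) x (y :: t) =
          y :: PySem.List.insertBy (fun a b => decide (key a < key b)) x t := by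
        simp [PySem.List.insertBy, hxy]
      rw [hstep]
      by_cases hpy : p y
      · simp only [List.filter, hpy, ih ht]
        by_cases hpx : p x
        · simp [hpx, PySem.List.insertBy, hxy]
        · simp [hpx]
      · simp only [List.filter, hpy, ih ht]

/-- Filtering commutes with the stable sort. -/
theorem filter_sorted {α : Type} (key : α → Int) (p : α → Bool) (xs : List α) :
    (PySem.List.sorted xs key).filter p = PySem.List.sorted (xs.filter p) key := by
  induction xs using List.reverseRecOn with
  | nil => rfl
  | append_singleton xs x ih =>
    rw [PySem.List.sorted_eq_foldl_insertBy, List.foldl_append,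
        ← PySem.List.sorted_eq_foldl_insertBy]
    simp only [List.foldl_cons, List.foldl_nil]
    rw [filter_insertBy key p x _ (PySem.List.sorted_pairwise xs key), ih]
    by_cases hpx : p x
    · rw [if_pos hpx, List.filter_append, show [x].filter p = [x] by simp [hpx],
          PySem.List.sorted_eq_foldl_insertBy (xs.filter p ++ [x]), List.foldl_append,
          ← PySem.List.sorted_eq_foldl_insertBy]
      rfl
    · rw [if_neg hpx, List.filter_append, show [x].filter p = [] by simp [hpx], List.append_nil]

/-- A's appending partition loop computes the two filters of its input. -/
theorem partition_foldl (l : List (Int × Int × Int))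
    (a b : List (Int × Int × Int)) :
    l.foldl
      (fun (acc : List (Int × Int × Int) × List (Int × Int × Int)) x =>
        if x.2.2 > 1000 then (acc.1 ++ [x], acc.2) else (acc.1, acc.2 ++ [x]))
      (a, b) =
      (a ++ l.filter (fun t => t.2.2 > 1000), b ++ l.filter (fun t => t.2.2 ≤ 1000)) := by
  induction l generalizing a b with
  | nil => simp
  | cons x t ih =>
    by_cases hx : x.2.2 > 1000
    · have hx' : ¬ x.2.2 ≤ 1000 := by omega
      simp [List.foldl_cons, hx, hx', ih]
    · have hx' : x.2.2 ≤ 1000 := by omega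
      simp [List.foldl_cons, hx, hx', ih]

-- ===== VERDICT (by name: the statement is the Claim_ definition above) =====
theorem orderBottles_spec : Claim_equal_orderBottles := by
  intro dataset _
  unfold Spec_orderBottles orderBottles orderBottles_alt
  simp only [partition_foldl, List.nil_append]
  rw [filter_sorted (fun tup => tup.2.1) (fun t => decide (t.2.2 > 1000)) dataset,
      filter_sorted (fun tup => tup.2.1) (fun t => decide (t.2.2 ≤ 1000)) dataset]
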